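-- pv_equiv track=rewrite | github.com/ETSim/TrueMapData | tester.py | getSourroundingVertices
-- ===== SOURCE A (Python) =====
-- def getSourroundingVertices(vert_set, x, y, w, h):
--     north, east, south, west = [], [], [], []
--     for i in range(x, x + w):
--         point = (i, y)
--         if point in vert_set:
--             north.append(vert_set[point])
--     for i in range(y, y + h):
--         point = (x + w, i)
--         if point in vert_set:
--             east.append(vert_set[point])
--     for i in range(x + w, x, -1):
--         point = (i, y + h)
--         if point in vert_set:
--             south.append(vert_set[point])
--     for i in range(y + h, y, -1):
--         point = (x, i)
--         if point in vert_set: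
--             west.append(vert_set[point])
--     return north, east, south, west
-- ===== SOURCE B (Python) =====
-- def getSourroundingVertices(vert_set, x, y, w, h):
--     # One pass over the stored vertices instead of walking every perimeter
--     # coordinate; each bucket is then sorted back into the walk order.
--     north, east, south, west = [], [], [], []
--     for (px, py), v in vert_set.items():
--         if py == y and x <= px < x + w:
--             north.append((px, v))
--         if px == x + w and y <= py < y + h:
--             east.append((py, v))
--         if py == y + h and x < px <= x + w:
--             south.append((px, v))
--         if px == x and y < py <= y + h:
--             west.append((py, v))
--     north.sort(key=lambda t: t[0])
--     east.sort(key=lambda t: t[0])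
--     south.sort(key=lambda t: t[0], reverse=True)
--     west.sort(key=lambda t: t[0], reverse=True)
--     return ([v for _, v in north], [v for _, v in east],
--             [v for _, v in south], [v for _, v in west])
-- ===== Notes on version B (the rewrite author's own statement) =====
-- stated objective: faster
-- what changed: Instead of walking every perimeter coordinate and probing the dict at each, B makes one pass over the stored vertices, buckets each onto its edge by an arithmetic test, and sorts each bucket back into the walk order, so cost depends on the number of vertices, not on w+h.
import Mathlib
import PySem

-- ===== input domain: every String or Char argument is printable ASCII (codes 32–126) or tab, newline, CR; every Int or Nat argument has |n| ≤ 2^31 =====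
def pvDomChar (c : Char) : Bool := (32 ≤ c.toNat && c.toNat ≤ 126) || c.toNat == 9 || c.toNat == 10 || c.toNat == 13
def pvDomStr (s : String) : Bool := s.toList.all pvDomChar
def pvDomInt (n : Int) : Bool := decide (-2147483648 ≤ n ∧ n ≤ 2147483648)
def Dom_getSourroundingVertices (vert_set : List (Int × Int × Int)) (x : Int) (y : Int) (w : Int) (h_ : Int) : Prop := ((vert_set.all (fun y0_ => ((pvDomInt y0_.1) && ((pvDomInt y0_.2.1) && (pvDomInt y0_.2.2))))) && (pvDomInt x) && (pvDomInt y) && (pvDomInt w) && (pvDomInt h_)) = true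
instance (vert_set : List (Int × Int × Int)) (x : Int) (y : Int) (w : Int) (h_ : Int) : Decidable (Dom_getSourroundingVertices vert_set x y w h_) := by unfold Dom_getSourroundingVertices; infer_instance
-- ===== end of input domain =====

-- B replaces A's walk over every perimeter coordinate by one pass over the stored
-- vertices that buckets each one onto its edge, plus a sort back into walk order
-- (objective: faster when the perimeter is long relative to the vertex count).

-- ===== PORT A =====
-- dict lookup vert_set[(a, b)] on the association list: first matching key
def pvLookup (vs : List (Int × Int × Int)) (a b : Int) : Option Int :=
  (vs.find? (fun t => t.1 == a && t.2.1 == b)).map (fun t => t.2.2)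

def getSourroundingVertices (vert_set : List (Int × Int × Int)) (x : Int) (y : Int) (w : Int) (h_ : Int) : List Int × List Int × List Int × List Int :=
  let north := (PySem.List.pyRange x (x + w) 1).foldl (fun acc i =>
    match pvLookup vert_set i y with | some v => acc ++ [v] | none => acc) []
  let east := (PySem.List.pyRange y (y + h_) 1).foldl (fun acc i =>
    match pvLookup vert_set (x + w) i with | some v => acc ++ [v] | none => acc) []
  let south := (PySem.List.pyRange (x + w) x (-1)).foldl (fun acc i =>
    match pvLookup vert_set i (y + h_) with | some v => acc ++ [v] | none => acc) []
  let west := (PySem.List.pyRange (y + h_) y (-1)).foldl (fun acc i =>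
    match pvLookup vert_set x i with | some v => acc ++ [v] | none => acc) []
  (north, east, south, west)

-- ===== PORT B =====
-- loop body of B: the four independent edge tests appending (coordinate, value)
def pvStep (x y w h_ : Int)
    (acc : List (Int × Int) × List (Int × Int) × List (Int × Int) × List (Int × Int))
    (t : Int × Int × Int) :
    List (Int × Int) × List (Int × Int) × List (Int × Int) × List (Int × Int) :=
  let acc := if t.2.1 = y ∧ x ≤ t.1 ∧ t.1 < x + w then
      (acc.1 ++ [(t.1, t.2.2)], acc.2.1, acc.2.2.1, acc.2.2.2) else acc
  let acc := if t.1 = x + w ∧ y ≤ t.2.1 ∧ t.2.1 < y + h_ then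
      (acc.1, acc.2.1 ++ [(t.2.1, t.2.2)], acc.2.2.1, acc.2.2.2) else acc
  let acc := if t.2.1 = y + h_ ∧ x < t.1 ∧ t.1 ≤ x + w then
      (acc.1, acc.2.1, acc.2.2.1 ++ [(t.1, t.2.2)], acc.2.2.2) else acc
  let acc := if t.1 = x ∧ y < t.2.1 ∧ t.2.1 ≤ y + h_ then
      (acc.1, acc.2.1, acc.2.2.1, acc.2.2.2 ++ [(t.2.1, t.2.2)]) else acc
  acc

def getSourroundingVertices_alt (vert_set : List (Int × Int × Int)) (x : Int) (y : Int) (w : Int) (h_ : Int) : List Int × List Int × List Int × List Int :=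
  let b := vert_set.foldl (pvStep x y w h_) ([], [], [], [])
  ((PySem.List.sorted b.1 (fun t => t.1) false).map (fun t => t.2),
   (PySem.List.sorted b.2.1 (fun t => t.1) false).map (fun t => t.2),
   (PySem.List.sorted b.2.2.1 (fun t => t.1) true).map (fun t => t.2),
   (PySem.List.sorted b.2.2.2 (fun t => t.1) true).map (fun t => t.2))

-- ===== PRECONDITION & SPEC =====
-- Pre_ excludes association lists with a duplicate (px, py) key: such a list does
-- not represent any Python dict (the dict literal collapses duplicates), so the
-- list-level behaviour there is accidental (A's port takes the first match, B's
-- port buckets every copy).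
def Pre_getSourroundingVertices (vert_set : List (Int × Int × Int)) (x : Int) (y : Int) (w : Int) (h_ : Int) : Prop :=
  (vert_set.map (fun t => (t.1, t.2.1))).Nodup
instance (vert_set : List (Int × Int × Int)) (x : Int) (y : Int) (w : Int) (h_ : Int) : Decidable (Pre_getSourroundingVertices vert_set x y w h_) := by unfold Pre_getSourroundingVertices; infer_instance

def pvWitness_getSourroundingVertices : (List (Int × Int × Int)) × Int × Int × Int × Int :=
  ([(0, 0, 5), (1, 0, 9), (0, 1, 10)], 0, 0, 2, 2)

def Spec_getSourroundingVertices (vert_set : List (Int × Int × Int)) (x : Int) (y : Int) (w : Int) (h_ : Int) (out : List Int × List Int × List Int × List Int) : Prop := out = getSourroundingVertices_alt vert_set x y w h_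
instance (vert_set : List (Int × Int × Int)) (x : Int) (y : Int) (w : Int) (h_ : Int) (out : List Int × List Int × List Int × List Int) : Decidable (Spec_getSourroundingVertices vert_set x y w h_ out) := by unfold Spec_getSourroundingVertices; infer_instance

-- ===== CLAIM (what is proved, stated in full; the proofs are below) =====
def Claim_equal_getSourroundingVertices : Prop := ∀ (vert_set : List (Int × Int × Int)) (x : Int) (y : Int) (w : Int) (h_ : Int), Dom_getSourroundingVertices vert_set x y w h_ → Pre_getSourroundingVertices vert_set x y w h_ → Spec_getSourroundingVertices vert_set x y w h_ (getSourroundingVertices vert_set x y w h_)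

-- ===== LEMMAS AND PROOFS =====

theorem pvWitness_ok :
    Dom_getSourroundingVertices pvWitness_getSourroundingVertices.1 pvWitness_getSourroundingVertices.2.1 pvWitness_getSourroundingVertices.2.2.1 pvWitness_getSourroundingVertices.2.2.2.1 pvWitness_getSourroundingVertices.2.2.2.2 ∧
    Pre_getSourroundingVertices pvWitness_getSourroundingVertices.1 pvWitness_getSourroundingVertices.2.1 pvWitness_getSourroundingVertices.2.2.1 pvWitness_getSourroundingVertices.2.2.2.1 pvWitness_getSourroundingVertices.2.2.2.2 := by
  constructor <;> decide

-- A's append loop is a filterMap over the index list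
theorem pvFoldlAppend (l : List Int) (f : Int → Option Int) (init : List Int) :
    l.foldl (fun acc i => match f i with | some v => acc ++ [v] | none => acc) init
      = init ++ l.filterMap f := by
  induction l generalizing init with
  | nil => simp
  | cons hd tl ih =>
    cases hf : f hd <;> simp [List.foldl_cons, hf, ih]

theorem pvStep_spec (x y w h_ : Int) (vs : List (Int × Int × Int))
    (a1 a2 a3 a4 : List (Int × Int)) :
    vs.foldl (pvStep x y w h_) (a1, a2, a3, a4) =
      (a1 ++ (vs.filter (fun t => decide (t.2.1 = y ∧ x ≤ t.1 ∧ t.1 < x + w))).map (fun t => (t.1, t.2.2)),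
       a2 ++ (vs.filter (fun t => decide (t.1 = x + w ∧ y ≤ t.2.1 ∧ t.2.1 < y + h_))).map (fun t => (t.2.1, t.2.2)),
       a3 ++ (vs.filter (fun t => decide (t.2.1 = y + h_ ∧ x < t.1 ∧ t.1 ≤ x + w))).map (fun t => (t.1, t.2.2)),
       a4 ++ (vs.filter (fun t => decide (t.1 = x ∧ y < t.2.1 ∧ t.2.1 ≤ y + h_))).map (fun t => (t.2.1, t.2.2))) := by
  have hstep : ∀ (t : Int × Int × Int) (a1 a2 a3 a4 : List (Int × Int)),
      pvStep x y w h_ (a1, a2, a3, a4) t =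
        (a1 ++ if t.2.1 = y ∧ x ≤ t.1 ∧ t.1 < x + w then [(t.1, t.2.2)] else [],
         a2 ++ if t.1 = x + w ∧ y ≤ t.2.1 ∧ t.2.1 < y + h_ then [(t.2.1, t.2.2)] else [],
         a3 ++ if t.2.1 = y + h_ ∧ x < t.1 ∧ t.1 ≤ x + w then [(t.1, t.2.2)] else [],
         a4 ++ if t.1 = x ∧ y < t.2.1 ∧ t.2.1 ≤ y + h_ then [(t.2.1, t.2.2)] else []) := by
    intro t a1 a2 a3 a4
    unfold pvStep
    split_ifs <;> simp
  induction vs generalizing a1 a2 a3 a4 with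
  | nil => simp
  | cons t tl ih =>
    rw [List.foldl_cons, hstep, ih]
    simp only [List.filter_cons]
    refine Prod.ext ?_ (Prod.ext ?_ (Prod.ext ?_ ?_)) <;>
      · simp only [decide_eq_true_eq]
        split_ifs with h <;> simp [List.append_assoc]

-- dict lookup on a duplicate-free association list finds exactly the stored triple
theorem pvLookup_eq_some_iff (vs : List (Int × Int × Int))
    (hnd : (vs.map (fun t => (t.1, t.2.1))).Nodup) (a b v : Int) :
    pvLookup vs a b = some v ↔ (a, b, v) ∈ vs := by
  induction vs with
  | nil => simp [pvLookup]
  | cons t tl ih =>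
    simp only [List.map_cons, List.nodup_cons] at hnd
    by_cases hk : t.1 = a ∧ t.2.1 = b
    · have ht : t = (a, b, t.2.2) := by
        obtain ⟨h1, h2⟩ := hk
        exact Prod.ext h1 (Prod.ext h2 rfl)
      constructor
      · intro h
        simp [pvLookup, List.find?_cons, hk.1, hk.2] at h
        subst h; rw [ht]; exact List.mem_cons_self
      · intro h
        rcases List.mem_cons.mp h with h | h
        · rw [← h]
          simp [pvLookup, List.find?_cons, hk.1, hk.2]
        · exfalso
          apply hnd.1
          have : ((a, b, v).1, (a, b, v).2.1) ∈ tl.map (fun t => (t.1, t.2.1)) :=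
            List.mem_map_of_mem h
          simpa [hk.1, hk.2] using this
    · have hne : (t.1 == a && t.2.1 == b) = false := by
        simp only [Bool.and_eq_false_iff, beq_eq_false_iff_ne, ne_eq]
        tauto
      rw [show pvLookup (t :: tl) a b = pvLookup tl a b by
        simp [pvLookup, List.find?_cons, hne]]
      rw [ih hnd.2]
      constructor
      · exact fun h => List.mem_cons_of_mem _ h
      · intro h
        rcases List.mem_cons.mp h with h | h
        · exfalso; rw [← h] at hk; exact hk ⟨rfl, rfl⟩
        · exact h

-- the bucket (filtered & mapped) is a permutation of A's walk pairs
theorem pvEdgePerm (vs : List (Int × Int × Int)) (idxs : List Int)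
    (pt : Int → Int × Int) (inv : Int × Int → Int)
    (q : Int × Int × Int → Bool) (g : Int × Int × Int → Int × Int)
    (hnd : (vs.map (fun t => (t.1, t.2.1))).Nodup)
    (hpw : idxs.Pairwise (fun a b => a ≠ b))
    (hinv : ∀ i, inv (pt i) = i)
    (hq : ∀ t, q t = true ↔ (t.1, t.2.1) ∈ idxs.map pt)
    (hg : ∀ t, g t = (inv (t.1, t.2.1), t.2.2)) :
    ((vs.filter q).map g).Perm
      (idxs.filterMap (fun i => (pvLookup vs (pt i).1 (pt i).2).map (fun v => (i, v)))) := by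
  have hptinj : Function.Injective pt := by
    intro i j hij
    have := hinv i; rw [hij, hinv j] at this; exact this.symm
  -- membership characterisation of the right-hand side
  have hmemR : ∀ p : Int × Int,
      p ∈ idxs.filterMap (fun i => (pvLookup vs (pt i).1 (pt i).2).map (fun v => (i, v)))
        ↔ p.1 ∈ idxs ∧ ((pt p.1).1, (pt p.1).2, p.2) ∈ vs := by
    intro p
    rw [List.mem_filterMap]
    constructor
    · rintro ⟨i, hi, hsome⟩
      rcases Option.map_eq_some_iff.mp hsome with ⟨v, hv, hpv⟩
      cases hpv
      exact ⟨hi, (pvLookup_eq_some_iff vs hnd _ _ _).mp hv⟩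
    · rintro ⟨hi, hmem⟩
      refine ⟨p.1, hi, ?_⟩
      rw [(pvLookup_eq_some_iff vs hnd (pt p.1).1 (pt p.1).2 p.2).mpr hmem]
      rfl
  -- membership characterisation of the left-hand side
  have hmemL : ∀ p : Int × Int,
      p ∈ (vs.filter q).map g ↔ p.1 ∈ idxs ∧ ((pt p.1).1, (pt p.1).2, p.2) ∈ vs := by
    intro p
    rw [List.mem_map]
    constructor
    · rintro ⟨t, htf, hgt⟩
      rcases List.mem_filter.mp htf with ⟨htv, hqt⟩
      rcases List.mem_map.mp ((hq t).mp hqt) with ⟨i, hi, hpti⟩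
      rw [hg t, ← hpti, hinv i] at hgt
      have hp1 : p.1 = i := by rw [← hgt]
      have hp2 : p.2 = t.2.2 := by rw [← hgt]
      subst hp1
      refine ⟨hi, ?_⟩
      have h1 : (pt p.1).1 = t.1 := by rw [hpti]
      have h2 : (pt p.1).2 = t.2.1 := by rw [hpti]
      rw [h1, h2, hp2]
      exact (by exact Prod.ext rfl (Prod.ext rfl rfl) : t = (t.1, t.2.1, t.2.2)) ▸ htv
    · rintro ⟨hi, hmem⟩
      refine ⟨((pt p.1).1, (pt p.1).2, p.2), List.mem_filter.mpr ⟨hmem, ?_⟩, ?_⟩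
      · rw [hq]
        simp only []
        exact List.mem_map.mpr ⟨p.1, hi, by simp⟩
      · rw [hg]
        simp [hinv p.1]
  -- both sides are duplicate-free
  have hndR : (idxs.filterMap (fun i => (pvLookup vs (pt i).1 (pt i).2).map (fun v => (i, v)))).Nodup := by
    have : (idxs.filterMap (fun i => (pvLookup vs (pt i).1 (pt i).2).map (fun v => (i, v)))).Pairwise
        (fun a b => a ≠ b) := by
      rw [List.pairwise_filterMap]
      refine hpw.imp_of_mem ?_
      intro a b _ _ hab
      intro p hp q' hq'
      rcases Option.map_eq_some_iff.mp hp with ⟨v, _, hv⟩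
      rcases Option.map_eq_some_iff.mp hq' with ⟨v', _, hv'⟩
      cases hv; cases hv'
      intro hcon
      exact hab (congrArg Prod.fst hcon)
    exact this
  have hndL : ((vs.filter q).map g).Nodup := by
    have hvnd : vs.Nodup := List.Nodup.of_map _ hnd
    have hfnd : (vs.filter q).Nodup := hvnd.filter q
    apply List.Nodup.map_on ?_ hfnd
    intro t1 ht1 t2 ht2 hgt
    rcases List.mem_filter.mp ht1 with ⟨ht1v, hq1⟩
    rcases List.mem_filter.mp ht2 with ⟨ht2v, hq2⟩
    rcases List.mem_map.mp ((hq t1).mp hq1) with ⟨i1, _, hpi1⟩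
    rcases List.mem_map.mp ((hq t2).mp hq2) with ⟨i2, _, hpi2⟩
    rw [hg t1, hg t2, ← hpi1, ← hpi2, hinv i1, hinv i2] at hgt
    have hi12 : i1 = i2 := (Prod.ext_iff.mp hgt).1
    have hv12 : t1.2.2 = t2.2.2 := (Prod.ext_iff.mp hgt).2
    have hkey : (t1.1, t1.2.1) = (t2.1, t2.2.1) := by rw [← hpi1, ← hpi2, hi12]
    have h1 : t1.1 = t2.1 := (Prod.ext_iff.mp hkey).1
    have h2 : t1.2.1 = t2.2.1 := (Prod.ext_iff.mp hkey).2
    exact Prod.ext h1 (Prod.ext h2 hv12)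
  apply List.perm_of_nodup_nodup_toFinset_eq hndL hndR
  apply Finset.ext
  intro p
  simp only [List.mem_toFinset]
  rw [hmemL, hmemR]

-- ascending edge: the sorted bucket IS A's walk list
theorem pvEdgeAsc (vs : List (Int × Int × Int)) (idxs : List Int)
    (pt : Int → Int × Int) (inv : Int × Int → Int)
    (q : Int × Int × Int → Bool) (g : Int × Int × Int → Int × Int)
    (hnd : (vs.map (fun t => (t.1, t.2.1))).Nodup)
    (hsort : idxs.Pairwise (fun a b => a < b))
    (hinv : ∀ i, inv (pt i) = i)
    (hq : ∀ t, q t = true ↔ (t.1, t.2.1) ∈ idxs.map pt)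
    (hg : ∀ t, g t = (inv (t.1, t.2.1), t.2.2)) :
    PySem.List.sorted ((vs.filter q).map g) (fun t => t.1) false
      = idxs.filterMap (fun i => (pvLookup vs (pt i).1 (pt i).2).map (fun v => (i, v))) := by
  apply PySem.List.sorted_eq_of_perm_of_pairwise_lt
  · exact (pvEdgePerm vs idxs pt inv q g hnd (hsort.imp (fun h => ne_of_lt h)) hinv hq hg).symm
  · rw [List.pairwise_filterMap]
    refine hsort.imp_of_mem ?_
    intro a b _ _ hab p hp q' hq'
    rcases Option.map_eq_some_iff.mp hp with ⟨v, _, hv⟩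
    rcases Option.map_eq_some_iff.mp hq' with ⟨v', _, hv'⟩
    cases hv; cases hv'
    exact hab

-- descending edge: the reverse-sorted bucket IS A's countdown walk list
theorem pvEdgeDesc (vs : List (Int × Int × Int)) (idxs : List Int)
    (pt : Int → Int × Int) (inv : Int × Int → Int)
    (q : Int × Int × Int → Bool) (g : Int × Int × Int → Int × Int)
    (hnd : (vs.map (fun t => (t.1, t.2.1))).Nodup)
    (hsort : idxs.Pairwise (fun a b => b < a))
    (hinv : ∀ i, inv (pt i) = i)
    (hq : ∀ t, q t = true ↔ (t.1, t.2.1) ∈ idxs.map pt)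
    (hg : ∀ t, g t = (inv (t.1, t.2.1), t.2.2)) :
    PySem.List.sorted ((vs.filter q).map g) (fun t => t.1) true
      = idxs.filterMap (fun i => (pvLookup vs (pt i).1 (pt i).2).map (fun v => (i, v))) := by
  apply PySem.List.sorted_rev_eq_of_perm_of_pairwise_gt
  · exact (pvEdgePerm vs idxs pt inv q g hnd (hsort.imp (fun h => (ne_of_lt h).symm)) hinv hq hg).symm
  · rw [List.pairwise_filterMap]
    refine hsort.imp_of_mem ?_
    intro a b _ _ hab p hp q' hq'
    rcases Option.map_eq_some_iff.mp hp with ⟨v, _, hv⟩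
    rcases Option.map_eq_some_iff.mp hq' with ⟨v', _, hv'⟩
    cases hv; cases hv'
    exact hab

-- dropping the carried coordinate recovers A's value list
theorem pvMapSndFilterMap (l : List Int) (f : Int → Option Int) :
    (l.filterMap (fun i => (f i).map (fun v => (i, v)))).map (fun p : Int × Int => p.2)
      = l.filterMap f := by
  induction l with
  | nil => simp
  | cons hd tl ih => cases hf : f hd <;> simp [List.filterMap_cons, hf, ih]

-- ===== VERDICT (by name: the statement is the Claim_ definition above) =====
theorem getSourroundingVertices_spec : Claim_equal_getSourroundingVertices := by
  intro vs x y w h_ _ hpre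
  unfold Spec_getSourroundingVertices
  unfold getSourroundingVertices getSourroundingVertices_alt
  rw [pvStep_spec]
  have hnd : (vs.map (fun t => (t.1, t.2.1))).Nodup := hpre
  simp only []
  rw [pvFoldlAppend, pvFoldlAppend, pvFoldlAppend, pvFoldlAppend]
  simp only [List.nil_append]
  have hN := pvEdgeAsc vs (PySem.List.pyRange x (x + w) 1) (fun i => (i, y)) Prod.fst
      (fun t => decide (t.2.1 = y ∧ x ≤ t.1 ∧ t.1 < x + w)) (fun t => (t.1, t.2.2)) hnd
      (PySem.List.pairwise_lt_pyRange_one x (x + w)) (fun _ => rfl)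
      (by
        intro t
        simp only [decide_eq_true_iff, List.mem_map, PySem.List.mem_pyRange_one]
        constructor
        · rintro ⟨h1, h2, h3⟩; exact ⟨t.1, ⟨h2, h3⟩, by rw [h1]⟩
        · rintro ⟨i, hi, hp⟩
          have h1 : t.1 = i := (congrArg Prod.fst hp).symm
          have h2 : t.2.1 = y := (congrArg Prod.snd hp).symm
          exact ⟨h2, by omega⟩)
      (fun _ => rfl)
  have hE := pvEdgeAsc vs (PySem.List.pyRange y (y + h_) 1) (fun i => (x + w, i)) Prod.snd
      (fun t => decide (t.1 = x + w ∧ y ≤ t.2.1 ∧ t.2.1 < y + h_)) (fun t => (t.2.1, t.2.2)) hnd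
      (PySem.List.pairwise_lt_pyRange_one y (y + h_)) (fun _ => rfl)
      (by
        intro t
        simp only [decide_eq_true_iff, List.mem_map, PySem.List.mem_pyRange_one]
        constructor
        · rintro ⟨h1, h2, h3⟩; exact ⟨t.2.1, ⟨h2, h3⟩, by rw [h1]⟩
        · rintro ⟨i, hi, hp⟩
          have h1 : t.1 = x + w := (congrArg Prod.fst hp).symm
          have h2 : t.2.1 = i := (congrArg Prod.snd hp).symm
          exact ⟨h1, by omega⟩)
      (fun _ => rfl)
  have hSsort : (PySem.List.pyRange (x + w) x (-1)).Pairwise (fun a b => b < a) := by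
    rw [PySem.List.pyRange_neg_one_eq_reverse, List.pairwise_reverse]
    exact PySem.List.pairwise_lt_pyRange_one _ _
  have hWsort : (PySem.List.pyRange (y + h_) y (-1)).Pairwise (fun a b => b < a) := by
    rw [PySem.List.pyRange_neg_one_eq_reverse, List.pairwise_reverse]
    exact PySem.List.pairwise_lt_pyRange_one _ _
  have hS := pvEdgeDesc vs (PySem.List.pyRange (x + w) x (-1)) (fun i => (i, y + h_)) Prod.fst
      (fun t => decide (t.2.1 = y + h_ ∧ x < t.1 ∧ t.1 ≤ x + w)) (fun t => (t.1, t.2.2)) hnd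
      hSsort (fun _ => rfl)
      (by
        intro t
        simp only [decide_eq_true_iff, List.mem_map, PySem.List.mem_pyRange_neg_one]
        constructor
        · rintro ⟨h1, h2, h3⟩; exact ⟨t.1, ⟨h2, h3⟩, by rw [h1]⟩
        · rintro ⟨i, hi, hp⟩
          have h1 : t.1 = i := (congrArg Prod.fst hp).symm
          have h2 : t.2.1 = y + h_ := (congrArg Prod.snd hp).symm
          exact ⟨h2, by omega⟩)
      (fun _ => rfl)
  have hW := pvEdgeDesc vs (PySem.List.pyRange (y + h_) y (-1)) (fun i => (x, i)) Prod.snd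
      (fun t => decide (t.1 = x ∧ y < t.2.1 ∧ t.2.1 ≤ y + h_)) (fun t => (t.2.1, t.2.2)) hnd
      hWsort (fun _ => rfl)
      (by
        intro t
        simp only [decide_eq_true_iff, List.mem_map, PySem.List.mem_pyRange_neg_one]
        constructor
        · rintro ⟨h1, h2, h3⟩; exact ⟨t.2.1, ⟨h2, h3⟩, by rw [h1]⟩
        · rintro ⟨i, hi, hp⟩
          have h1 : t.1 = x := (congrArg Prod.fst hp).symm
          have h2 : t.2.1 = i := (congrArg Prod.snd hp).symm
          exact ⟨h1, by omega⟩)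
      (fun _ => rfl)
  rw [hN, hE, hS, hW, pvMapSndFilterMap, pvMapSndFilterMap, pvMapSndFilterMap, pvMapSndFilterMap]
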